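-- pv_equiv track=rewrite | github.com/fspv/learning | codejam/2020-04-04/Indicium/indicium.py | find_possible_sums
-- ===== SOURCE A (Python) =====
-- from functools import lru_cache
--
-- def find_possible_sums(target: int, max_diff: int, steps: int):
--     @lru_cache(None)
--     def dfs(target_left: int, max_diff: int, steps_left: int):
--         if target_left < 0:
--             return
--
--         if target_left > 0 and steps_left == 0:
--             return
--
--         if target_left == 0 and steps_left == 0:
--             return [[]]
--
--         if target_left // steps_left > max_diff:
--             return
--
--         result = []
--
--         for diff in reversed(range(1, max_diff + 1)):
--             sums = dfs(target_left - diff, max_diff, steps_left - 1)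
--
--             for s in sums if sums else []:
--                 result.append([diff] + s)
--
--         return result
--
--     return dfs(target, max_diff, steps)
-- ===== SOURCE B (Python) =====
-- def find_possible_sums(target: int, max_diff: int, steps: int):
--     # None sentinel exactly where the search is declared infeasible up front
--     if target < 0 or (target > 0 and steps == 0):
--         return None
--     if target == 0 and steps == 0:
--         return [[]]
--     if target // steps > max_diff:
--         return None
--     return _compositions(target, max_diff, steps)
--
--
-- def _compositions(t: int, md: int, s: int):
--     """All ways to write t as s parts in [1, md], descending-lexicographic.
--
--     Instead of scanning every diff in 1..md and pruning dead branches with a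
--     None sentinel (as the memoised DFS does), each level computes the closed
--     interval [lo, hi] of diffs that can still lead to a composition, so every
--     branch taken is productive."""
--     if s <= 0:
--         return [[]] if (s == 0 and t == 0) else []
--     lo = max(1, t - (s - 1) * md)   # the s-1 later parts carry at most (s-1)*md
--     hi = min(md, t - (s - 1))       # and at least s-1
--     return [[d] + rest
--             for d in reversed(range(lo, hi + 1))
--             for rest in _compositions(t - d, md, s - 1)]
-- ===== Notes on version B (the rewrite author's own statement) =====
-- stated objective: alternative
-- what changed: The memoised None-sentinel DFS over every diff in 1..max_diff is replaced by a direct enumerator that at each level computes the closed feasible interval [max(1,t-(s-1)*max_diff), min(max_diff,t-(s-1))] of next parts, so it only ever walks productive branches (no cache, no sentinel, no full-range scan).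
-- outside the precondition, e.g. on find_possible_sums(3500, 1, -1): A returns [], B returns []
import Mathlib
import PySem

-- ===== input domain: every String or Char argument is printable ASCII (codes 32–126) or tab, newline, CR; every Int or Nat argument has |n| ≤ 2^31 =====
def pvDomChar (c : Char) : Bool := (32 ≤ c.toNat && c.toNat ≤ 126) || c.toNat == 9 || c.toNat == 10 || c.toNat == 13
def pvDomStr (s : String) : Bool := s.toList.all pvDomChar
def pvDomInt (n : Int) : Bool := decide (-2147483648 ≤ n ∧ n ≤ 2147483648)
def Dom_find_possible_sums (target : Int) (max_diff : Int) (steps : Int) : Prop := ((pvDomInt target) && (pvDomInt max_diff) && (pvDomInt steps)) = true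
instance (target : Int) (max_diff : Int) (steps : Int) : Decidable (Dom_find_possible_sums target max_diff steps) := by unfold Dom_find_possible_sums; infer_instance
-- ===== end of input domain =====

-- B replaces A's memoised None-sentinel DFS over every diff in 1..max_diff by a direct
-- enumerator that walks only the closed feasible interval of next parts at each level
-- (alternative decomposition; same return value on all of Pre_).


-- ===== PORT A =====
-- Literal port of A's inner dfs. The Nat fuel only makes the recursion structural:
-- with fuel ≥ t.toNat + 2 the `0 => none` branch is never reached (dfsA_fuel_irrel below).
def dfsA : Nat → Int → Int → Int → Option (List (List Int))
  | 0, _, _, _ => none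
  | fuel+1, t, md, s =>
    if t < 0 then none
    else if 0 < t ∧ s = 0 then none
    else if t = 0 ∧ s = 0 then some [[]]
    else if md < PySem.Int.floordiv t s then none
    else
      some (((PySem.List.pyRange 1 (md+1) 1).reverse).foldl
        (fun result diff =>
          result ++ ((dfsA fuel (t-diff) md (s-1)).getD []).map (fun x => diff :: x)) [])

def find_possible_sums (target : Int) (max_diff : Int) (steps : Int) : Option (List (List Int)) :=
  dfsA ((target+1).toNat + 1) target max_diff steps

-- ===== PORT B =====
-- Port of Source B's _compositions; same fuel device (never exhausted for fuel ≥ t.toNat + 2).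
def enumComp : Nat → Int → Int → Int → List (List Int)
  | 0, _, _, _ => []
  | fuel+1, t, md, s =>
    if s ≤ 0 then (if s = 0 ∧ t = 0 then [[]] else [])
    else
      let lo := max 1 (t - (s-1)*md)
      let hi := min md (t - (s-1))
      ((PySem.List.pyRange lo (hi+1) 1).reverse).flatMap
        (fun d => (enumComp fuel (t-d) md (s-1)).map (fun rest => d :: rest))

def find_possible_sums_alt (target : Int) (max_diff : Int) (steps : Int) : Option (List (List Int)) :=
  if target < 0 ∨ (0 < target ∧ steps = 0) then none
  else if target = 0 ∧ steps = 0 then some [[]]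
  else if max_diff < PySem.Int.floordiv target steps then none
  else some (enumComp ((target+1).toNat + 1) target max_diff steps)

-- ===== PRECONDITION & SPEC =====
-- Pre_ excludes deep-recursion inputs on which the Python A overruns the interpreter's
-- recursion limit and raises RecursionError; the bound is conservative, so a few
-- deep-but-still-returning inputs (e.g. (3500, 1, -1), where both return []) are excluded too.
def Pre_find_possible_sums (target : Int) (max_diff : Int) (steps : Int) : Prop :=
  target < 0 ∨ (0 ≤ steps ∧ steps ≤ 3000) ∨ target ≤ 3000 ∨ max_diff ≤ 0 ∨
    (steps ≠ 0 ∧ max_diff < PySem.Int.floordiv target steps)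
instance (target : Int) (max_diff : Int) (steps : Int) : Decidable (Pre_find_possible_sums target max_diff steps) := by unfold Pre_find_possible_sums; infer_instance
def pvWitness_find_possible_sums : Int × Int × Int := (5, 3, 2)

def Spec_find_possible_sums (target : Int) (max_diff : Int) (steps : Int) (out : Option (List (List Int))) : Prop := out = find_possible_sums_alt target max_diff steps
instance (target : Int) (max_diff : Int) (steps : Int) (out : Option (List (List Int))) : Decidable (Spec_find_possible_sums target max_diff steps out) := by unfold Spec_find_possible_sums; infer_instance

-- ===== CLAIM (what is proved, stated in full; the proofs are below) =====
def Claim_equal_find_possible_sums : Prop := ∀ (target : Int) (max_diff : Int) (steps : Int), Dom_find_possible_sums target max_diff steps → Pre_find_possible_sums target max_diff steps → Spec_find_possible_sums target max_diff steps (find_possible_sums target max_diff steps)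

-- ===== LEMMAS AND PROOFS =====

lemma dfsA_neg (f : Nat) (t md s : Int) (h : t < 0) : dfsA f t md s = none := by
  cases f <;> simp [dfsA, h]

lemma enumComp_neg (f : Nat) (t md s : Int) (hs : ¬ (s = 0 ∧ t = 0)) (hs' : s ≤ 0) :
    enumComp f t md s = [] := by
  cases f <;> simp [enumComp, hs, hs']

lemma enumComp_zero (f : Nat) (md : Int) (hf : 1 ≤ f) : enumComp f 0 md 0 = [[]] := by
  cases f
  · omega
  · simp [enumComp]

lemma enumComp_small (f : Nat) (t md s : Int) (hs : 0 < s) (h : t < s) :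
    enumComp f t md s = [] := by
  cases f
  · rfl
  · have h1 : ¬ s ≤ 0 := by omega
    have h2 : PySem.List.pyRange (max 1 (t - (s-1)*md)) (min md (t - (s-1)) + 1) 1 = [] :=
      PySem.List.pyRange_one_eq_nil (by omega)
    simp [enumComp, h1, h2]

lemma enumComp_big (f : Nat) (t md s : Int) (hs : 0 < s) (h : s * md < t) :
    enumComp f t md s = [] := by
  cases f
  · rfl
  · have h1 : ¬ s ≤ 0 := by omega
    have hmd : md < t - (s-1)*md := by nlinarith
    have h2 : PySem.List.pyRange (max 1 (t - (s-1)*md)) (min md (t - (s-1)) + 1) 1 = [] :=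
      PySem.List.pyRange_one_eq_nil (by omega)
    simp [enumComp, h1, h2]

lemma dfsA_formula : ∀ (f : Nat) (t md s : Int), 0 ≤ t → t.toNat + 2 ≤ f →
    dfsA f t md s =
      if 0 < t ∧ s = 0 then none
      else if t = 0 ∧ s = 0 then some [[]]
      else if md < PySem.Int.floordiv t s then none
      else some (enumComp f t md s) := by
  intro f
  induction f with
  | zero => intro t md s ht hf; omega
  | succ f ih =>
    intro t md s ht hf
    have ht' : ¬ t < 0 := by omega
    simp only [dfsA, ht', if_false]
    split_ifs with h1 h2 h3
    · rfl
    · rfl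
    · rfl
    refine congrArg some ?_
    rw [PySem.List.foldl_append_eq_flatMap, List.nil_append]
    have hs0 : s ≠ 0 := by omega
    -- the loop body of A, as a function of the current diff d
    set g : Int → List (List Int) :=
      fun d => ((dfsA f (t-d) md (s-1)).getD []).map (fun x => d :: x) with hg
    by_cases hspos : 0 < s
    case neg =>
      -- s < 0: no composition can ever close; both sides are []
      have hsneg : s < 0 := by omega
      have hnil : ∀ d ∈ (PySem.List.pyRange 1 (md+1) 1).reverse, g d = [] := by
        intro d hd
        rw [List.mem_reverse, PySem.List.mem_pyRange_one] at hd
        rw [hg]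
        beta_reduce
        by_cases hneg : t - d < 0
        · rw [dfsA_neg f _ _ _ hneg]; rfl
        · rw [ih (t-d) md (s-1) (by omega) (by omega)]
          rw [if_neg (by omega), if_neg (by omega)]
          by_cases hg3 : md < PySem.Int.floordiv (t-d) (s-1)
          · rw [if_pos hg3]; rfl
          · rw [if_neg hg3, enumComp_neg f _ md _ (by omega) (by omega)]; rfl
      rw [List.flatMap_eq_nil_iff.mpr hnil,
          enumComp_neg (f+1) t md s (by omega) (by omega)]
    case pos =>
      set lo : Int := max 1 (t - (s-1)*md) with hlo_def
      set hi : Int := min md (t - (s-1)) with hhi_def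
      have hcontrib : ∀ d : Int, 1 ≤ d → d ≤ md →
          g d = (if lo ≤ d ∧ d ≤ hi then
            (enumComp f (t-d) md (s-1)).map (fun x => d :: x) else []) := by
        intro d hd1 hd2
        rw [hg]
        beta_reduce
        by_cases hw : lo ≤ d ∧ d ≤ hi
        · -- d inside the feasible window
          have htd : 0 ≤ t - d := by omega
          rw [if_pos hw, ih (t-d) md (s-1) htd (by omega)]
          by_cases hg1 : 0 < t - d ∧ s - 1 = 0
          · rw [if_pos hg1, enumComp_neg f _ md _ (by omega) (by omega)]; rfl
          · rw [if_neg hg1]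
            by_cases hg2 : t - d = 0 ∧ s - 1 = 0
            · rw [if_pos hg2, hg2.1, hg2.2, enumComp_zero f md (by omega)]; rfl
            · rw [if_neg hg2]
              have hs1 : 0 < s - 1 := by omega
              by_cases hg3 : md < PySem.Int.floordiv (t-d) (s-1)
              · rw [if_pos hg3]
                have hmul : (md + 1) * (s - 1) ≤ t - d :=
                  (PySem.Int.le_floordiv_iff_mul_le hs1).mp (by omega)
                rw [enumComp_big f _ md _ hs1 (by nlinarith)]; rfl
              · rw [if_neg hg3]; rfl
        · -- d outside the window: A's branch is dead
          rw [if_neg hw]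
          by_cases hneg : t - d < 0
          · rw [dfsA_neg f _ _ _ hneg]; rfl
          · rw [ih (t-d) md (s-1) (by omega) (by omega)]
            rcases not_and_or.mp hw with hout | hout
            · -- d < t - (s-1)*max_diff: the remaining sum is too large
              have hdl : d < t - (s-1)*md := by omega
              by_cases hg1 : 0 < t - d ∧ s - 1 = 0
              · rw [if_pos hg1]; rfl
              · rw [if_neg hg1]
                have hs1 : 0 < s - 1 := by
                  by_contra hc
                  have hseq : (s-1)*md = 0 := by
                    have : s - 1 = 0 := by omega
                    rw [this]; ring
                  exact hg1 (by omega)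
                rw [if_neg (by omega)]
                by_cases hg3 : md < PySem.Int.floordiv (t-d) (s-1)
                · rw [if_pos hg3]; rfl
                · rw [if_neg hg3, enumComp_big f _ md _ hs1 (by omega)]; rfl
            · -- d > min max_diff (t-(s-1)): too few remaining to place s-1 parts
              have hs1 : 0 < s - 1 := by omega
              rw [if_neg (by omega), if_neg (by omega)]
              by_cases hg3 : md < PySem.Int.floordiv (t-d) (s-1)
              · rw [if_pos hg3]; rfl
              · rw [if_neg hg3, enumComp_small f _ md _ hs1 (by omega)]; rfl
      -- unfold B one level: the same window, the same child calls
      have hB : enumComp (f+1) t md s =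
          (PySem.List.pyRange lo (hi+1) 1).reverse.flatMap
            (fun d => (enumComp f (t-d) md (s-1)).map (fun x => d :: x)) := by
        simp only [enumComp, if_neg (show ¬ s ≤ 0 by omega)]
        rfl
      rw [hB]
      by_cases hwin : lo ≤ hi
      · have hsplit : PySem.List.pyRange 1 (md+1) 1 =
            (PySem.List.pyRange 1 lo 1 ++ PySem.List.pyRange lo (hi+1) 1) ++
              PySem.List.pyRange (hi+1) (md+1) 1 := by
          rw [← PySem.List.pyRange_one_append 1 lo (hi+1) (by omega) (by omega),
              ← PySem.List.pyRange_one_append 1 (hi+1) (md+1) (by omega) (by omega)]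
        rw [hsplit, List.reverse_append, List.reverse_append, List.flatMap_append,
            List.flatMap_append]
        have e1 : (PySem.List.pyRange (hi+1) (md+1) 1).reverse.flatMap g = [] := by
          apply List.flatMap_eq_nil_iff.mpr
          intro d hd
          rw [List.mem_reverse, PySem.List.mem_pyRange_one] at hd
          rw [hcontrib d (by omega) (by omega), if_neg (by omega)]
        have e2 : (PySem.List.pyRange 1 lo 1).reverse.flatMap g = [] := by
          apply List.flatMap_eq_nil_iff.mpr
          intro d hd
          rw [List.mem_reverse, PySem.List.mem_pyRange_one] at hd
          rw [hcontrib d (by omega) (by omega), if_neg (by omega)]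
        rw [e1, e2, List.append_nil, List.nil_append]
        apply List.flatMap_congr
        intro d hd
        rw [List.mem_reverse, PySem.List.mem_pyRange_one] at hd
        rw [hcontrib d (by omega) (by omega), if_pos (by omega)]
      · -- empty window: both sides are []
        rw [PySem.List.pyRange_one_eq_nil (show hi+1 ≤ lo by omega)]
        simp only [List.reverse_nil, List.flatMap_nil]
        apply List.flatMap_eq_nil_iff.mpr
        intro d hd
        rw [List.mem_reverse, PySem.List.mem_pyRange_one] at hd
        rw [hcontrib d (by omega) (by omega), if_neg (by omega)]

-- ===== VERDICT (by name: the statement is the Claim_ definition above) =====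
theorem find_possible_sums_spec : Claim_equal_find_possible_sums := by
  intro target max_diff steps _ _
  unfold Spec_find_possible_sums find_possible_sums find_possible_sums_alt
  by_cases ht : target < 0
  · simp [dfsA, ht]
  · rw [not_lt] at ht
    have hf : (target+1).toNat + 1 = target.toNat + 2 := by omega
    rw [hf, dfsA_formula _ _ _ _ ht (le_refl _)]
    split_ifs with h1 h2 h3 h4 h5 h6 <;> first | rfl | omega
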